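-- pv_equiv track=rewrite | github.com/d1zm4as/CodeWars | Python/6 Kyu/pair_wise.py | pairwise
-- ===== SOURCE A (Python) =====
-- def pairwise(arr, n):
--     lista = []
--     ref = []
--     for idx,x in enumerate(arr):
--         for idy,y in  enumerate(arr[:-1]):
--             if  x+y ==n and idx!=idy and idx not in ref and idy not in ref:
--                 ref.append(idx)
--                 ref.append(idy)
--                 lista.append(idx)
--                 lista.append(idy)
--
--     return sum(lista)
-- ===== SOURCE B (Python) =====
-- def pairwise(arr, n):
--     # Value-indexed buckets: map each value arr[j] (j over arr[:-1]) to its ascending index list.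
--     buckets = {}
--     for j in range(len(arr) - 1):
--         buckets.setdefault(arr[j], []).append(j)
--     used = set()
--     total = 0
--     for idx, x in enumerate(arr):
--         if idx in used:
--             continue
--         for idy in buckets.get(n - x, ()):
--             if idy not in used and idy != idx:
--                 used.add(idx)
--                 used.add(idy)
--                 total += idx + idy
--                 break
--     return total
-- ===== Notes on version B (the rewrite author's own statement) =====
-- stated objective: faster
-- what changed: B builds a value-to-indices bucket dict once and keeps a used-set, so each element finds its first eligible partner by a single bucket lookup instead of A's full inner scan over arr[:-1] for every element.
import Mathlib
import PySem

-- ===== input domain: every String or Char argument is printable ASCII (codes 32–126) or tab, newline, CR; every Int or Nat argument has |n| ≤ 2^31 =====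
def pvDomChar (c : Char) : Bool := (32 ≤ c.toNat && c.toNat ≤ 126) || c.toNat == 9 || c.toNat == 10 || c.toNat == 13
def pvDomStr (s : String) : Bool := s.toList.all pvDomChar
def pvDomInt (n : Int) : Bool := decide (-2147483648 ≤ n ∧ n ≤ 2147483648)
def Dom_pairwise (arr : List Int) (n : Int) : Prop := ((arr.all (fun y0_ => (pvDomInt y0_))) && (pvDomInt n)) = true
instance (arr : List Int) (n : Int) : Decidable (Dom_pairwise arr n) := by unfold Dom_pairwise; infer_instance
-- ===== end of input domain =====

-- B replaces A's repeated full inner scans with a one-time value→indices bucket dict and a used-set pass (objective: faster).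

-- ===== PORT A =====
def pairwise (arr : List Int) (n : Int) : Int :=
  let st := (PySem.List.enumerate arr).foldl (fun (st : List Int × List Int) p =>
    (PySem.List.enumerate (PySem.List.slice arr none (some (-1)))).foldl (fun st q =>
      if p.2 + q.2 = n ∧ p.1 ≠ q.1 ∧ p.1 ∉ st.2 ∧ q.1 ∉ st.2 then
        (st.1 ++ [p.1, q.1], st.2 ++ [p.1, q.1])
      else st) st) (([], []) : List Int × List Int)
  st.1.sum

-- ===== PORT B =====
-- the for/break scan of one bucket
def pairwise_findPartner (bucket : List Int) (used : PySem.Set Int) (idx : Int) : Option Int :=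
  match bucket with
  | [] => none
  | idy :: rest =>
      if idy ∉ used ∧ idy ≠ idx then some idy
      else pairwise_findPartner rest used idx

def pairwise_alt (arr : List Int) (n : Int) : Int :=
  let buckets := (PySem.List.pyRange 0 ((arr.length : Int) - 1) 1).foldl
    (fun (d : PySem.Dict Int (List Int)) j =>
      d.modify (PySem.List.pyGetD arr j 0) [] (fun l => l ++ [j])) PySem.Dict.empty
  let st := (PySem.List.enumerate arr).foldl (fun (st : PySem.Set Int × Int) p =>
    if p.1 ∈ st.1 then st
    else
      match pairwise_findPartner (buckets.getD (n - p.2) []) st.1 p.1 with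
      | some idy => (PySem.Set.add (PySem.Set.add st.1 p.1) idy, st.2 + p.1 + idy)
      | none => st) ((PySem.Set.empty, 0) : PySem.Set Int × Int)
  st.2

-- ===== PRECONDITION & SPEC =====
def Spec_pairwise (arr : List Int) (n : Int) (out : Int) : Prop := out = pairwise_alt arr n
instance (arr : List Int) (n : Int) (out : Int) : Decidable (Spec_pairwise arr n out) := by unfold Spec_pairwise; infer_instance

-- ===== CLAIM (what is proved, stated in full; the proofs are below) =====
def Claim_equal_pairwise : Prop := ∀ (arr : List Int) (n : Int), Dom_pairwise arr n → Spec_pairwise arr n (pairwise arr n)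

-- ===== LEMMAS AND PROOFS =====
-- inner loop of A: once p.1 is in ref, nothing changes
theorem pvA_inner_skip (n : Int) (p : Int × Int) (P : List (Int × Int))
    (L1 L2 : List Int) (h : p.1 ∈ L2) :
    P.foldl (fun st q =>
      if p.2 + q.2 = n ∧ p.1 ≠ q.1 ∧ p.1 ∉ st.2 ∧ q.1 ∉ st.2 then
        (st.1 ++ [p.1, q.1], st.2 ++ [p.1, q.1])
      else st) (L1, L2) = (L1, L2) := by
  induction P with
  | nil => rfl
  | cons a t ih =>
      simp only [List.foldl_cons]
      rw [if_neg (fun hc => hc.2.2.1 h)]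
      exact ih

-- inner loop of A: when p.1 is fresh, it appends the first matching partner (or nothing)
theorem pvA_inner_run (n : Int) (p : Int × Int) (P : List (Int × Int))
    (L : List Int) (hp : p.1 ∉ L) :
    P.foldl (fun st q =>
      if p.2 + q.2 = n ∧ p.1 ≠ q.1 ∧ p.1 ∉ st.2 ∧ q.1 ∉ st.2 then
        (st.1 ++ [p.1, q.1], st.2 ++ [p.1, q.1])
      else st) (L, L)
    = match P.find? (fun q => decide (p.2 + q.2 = n ∧ p.1 ≠ q.1 ∧ q.1 ∉ L)) with
      | some q => (L ++ [p.1, q.1], L ++ [p.1, q.1])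
      | none => (L, L) := by
  induction P with
  | nil => rfl
  | cons a t ih =>
      simp only [List.foldl_cons, List.find?_cons]
      by_cases h : p.2 + a.2 = n ∧ p.1 ≠ a.1 ∧ a.1 ∉ L
      · rw [decide_eq_true h, if_pos ⟨h.1, h.2.1, hp, h.2.2⟩]
        exact pvA_inner_skip n p t _ _ (by simp)
      · rw [decide_eq_false h, if_neg (fun hc => h ⟨hc.1, hc.2.1, hc.2.2.2⟩)]
        exact ih

-- find? on a filtered list
theorem pv_find?_filter {α : Type} (l : List α) (p q : α → Bool) :
    (l.filter p).find? q = l.find? (fun a => p a && q a) := by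
  induction l with
  | nil => rfl
  | cons a t ih =>
      by_cases h : p a
      · by_cases h2 : q a
        · simp [h, h2]
        · simp only [List.filter_cons, h, if_true]
          simp [h, h2, ih]
      · simp [h, ih]

-- the bucket scan IS find?
theorem pv_findPartner_eq (b : List Int) (used : PySem.Set Int) (idx : Int) :
    pairwise_findPartner b used idx
      = b.find? (fun idy => decide (idy ∉ used ∧ idy ≠ idx)) := by
  induction b with
  | nil => rfl
  | cons a t ih =>
      simp only [pairwise_findPartner, List.find?_cons]
      by_cases h : a ∉ used ∧ a ≠ idx
      · rw [decide_eq_true h, if_pos h]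
      · rw [if_neg h, decide_eq_false h, ih]

-- A's inner iteration space, written over the index range B uses
theorem pv_enum_dropLast (arr : List Int) :
    PySem.List.enumerate (PySem.List.slice arr none (some (-1)))
      = (PySem.List.pyRange 0 ((arr.length : Int) - 1) 1).map
          (fun j => (j, PySem.List.pyGetD arr j 0)) := by
  rw [PySem.List.slice_to_neg_one]
  rw [PySem.List.enumerate_eq_map_pyRange arr.dropLast 0]
  have hlen : (PySem.List.pyRange 0 (PySem.List.len arr.dropLast) 1)
      = PySem.List.pyRange 0 ((arr.length : Int) - 1) 1 := by
    cases arr with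
    | nil => simp [PySem.List.pyRange_one_eq_nil, PySem.List.len]
    | cons a t =>
        congr 1
        simp only [PySem.List.len, List.length_dropLast, List.length_cons]
        push_cast
        omega
  rw [hlen]
  apply List.map_congr_left
  intro j hj
  have hj' := (PySem.List.mem_pyRange_one.mp hj)
  have h0 : (0:Int) ≤ j := hj'.1
  have h1 : j < (arr.length : Int) - 1 := hj'.2
  have hd : arr.dropLast.length = arr.length - 1 := List.length_dropLast
  congr 1
  rw [PySem.List.pyGetD_eq_getElem _ _ h0 (by rw [hd]; omega),
      PySem.List.pyGetD_eq_getElem _ _ h0 (by omega)]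
  exact List.getElem_dropLast _

-- the bucket for value v lists, in ascending order, the indices j < len-1 with arr[j] = v
theorem pv_bucket_getD (arr : List Int) (v : Int) :
    ((PySem.List.pyRange 0 ((arr.length : Int) - 1) 1).foldl
      (fun (d : PySem.Dict Int (List Int)) j =>
        d.modify (PySem.List.pyGetD arr j 0) [] (fun l => l ++ [j])) PySem.Dict.empty).getD v []
    = (PySem.List.pyRange 0 ((arr.length : Int) - 1) 1).filter
        (fun j => PySem.List.pyGetD arr j 0 == v) := by
  have h : (PySem.List.pyRange 0 ((arr.length : Int) - 1) 1).foldl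
      (fun (d : PySem.Dict Int (List Int)) j =>
        d.modify (PySem.List.pyGetD arr j 0) [] (fun l => l ++ [j])) PySem.Dict.empty
    = ((PySem.List.pyRange 0 ((arr.length : Int) - 1) 1).map
        (fun j => (PySem.List.pyGetD arr j 0, j))).foldl
      (fun (d : PySem.Dict Int (List Int)) p =>
        d.modify p.1 [] (fun l => l ++ [p.2])) PySem.Dict.empty := by
    rw [List.foldl_map]
  rw [h, PySem.Dict.getD_foldl_modify_append, PySem.Dict.getD_empty]
  rw [List.filter_map, List.map_map]
  simp [Function.comp_def]

-- B's bucket scan equals (the index of) A's scan over the common iteration space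
theorem pv_partner (arr : List Int) (n x idx : Int) (L : List Int) :
    pairwise_findPartner
      (((PySem.List.pyRange 0 ((arr.length : Int) - 1) 1).foldl
        (fun (d : PySem.Dict Int (List Int)) j =>
          d.modify (PySem.List.pyGetD arr j 0) [] (fun l => l ++ [j]))
        PySem.Dict.empty).getD (n - x) []) L idx
    = Option.map Prod.fst
        (((PySem.List.pyRange 0 ((arr.length : Int) - 1) 1).map
            (fun j => (j, PySem.List.pyGetD arr j 0))).find?
          (fun q => decide (x + q.2 = n ∧ idx ≠ q.1 ∧ q.1 ∉ L))) := by
  rw [pv_findPartner_eq, pv_bucket_getD, pv_find?_filter, List.find?_map]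
  rw [Option.map_map]
  have hfun : (Prod.fst ∘ fun j => (j, PySem.List.pyGetD arr j 0)) = fun (j : Int) => j := rfl
  rw [hfun]
  have hpred : ((fun q : Int × Int => decide (x + q.2 = n ∧ idx ≠ q.1 ∧ q.1 ∉ L)) ∘
      fun j => (j, PySem.List.pyGetD arr j 0))
      = fun j => (PySem.List.pyGetD arr j 0 == n - x) && decide (j ∉ L ∧ j ≠ idx) := by
    funext j
    apply Bool.eq_iff_iff.mpr
    simp only [Function.comp_apply, Bool.and_eq_true, beq_iff_eq, decide_eq_true_eq]
    constructor
    · rintro ⟨h1, h2, h3⟩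
      exact ⟨by omega, h3, fun he => h2 he.symm⟩
    · rintro ⟨h1, h2, h3⟩
      exact ⟨by omega, fun he => h3 he.symm, h2⟩
  rw [hpred]
  cases hr : List.find?
      (fun j => (PySem.List.pyGetD arr j 0 == n - x) && decide (j ∉ L ∧ j ≠ idx))
      (PySem.List.pyRange 0 ((arr.length : Int) - 1) 1) <;> simp

-- main loop invariant: A's two components stay equal; B carries the same used set and the sum
theorem pv_main (arr : List Int) (n : Int) (ps : List (Int × Int)) :
    ∀ (L : List Int),
    ((ps.foldl (fun (st : List Int × List Int) p =>
        (PySem.List.enumerate (PySem.List.slice arr none (some (-1)))).foldl (fun st q =>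
          if p.2 + q.2 = n ∧ p.1 ≠ q.1 ∧ p.1 ∉ st.2 ∧ q.1 ∉ st.2 then
            (st.1 ++ [p.1, q.1], st.2 ++ [p.1, q.1])
          else st) st) (L, L)).2
      = (ps.foldl (fun (st : List Int × List Int) p =>
        (PySem.List.enumerate (PySem.List.slice arr none (some (-1)))).foldl (fun st q =>
          if p.2 + q.2 = n ∧ p.1 ≠ q.1 ∧ p.1 ∉ st.2 ∧ q.1 ∉ st.2 then
            (st.1 ++ [p.1, q.1], st.2 ++ [p.1, q.1])
          else st) st) (L, L)).1)
    ∧ ps.foldl (fun (st : PySem.Set Int × Int) p =>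
        if p.1 ∈ st.1 then st
        else
          match pairwise_findPartner
              ((((PySem.List.pyRange 0 ((arr.length : Int) - 1) 1).foldl
                (fun (d : PySem.Dict Int (List Int)) j =>
                  d.modify (PySem.List.pyGetD arr j 0) [] (fun l => l ++ [j]))
                PySem.Dict.empty)).getD (n - p.2) []) st.1 p.1 with
          | some idy => (PySem.Set.add (PySem.Set.add st.1 p.1) idy, st.2 + p.1 + idy)
          | none => st) (L, L.sum)
      = ((ps.foldl (fun (st : List Int × List Int) p =>
        (PySem.List.enumerate (PySem.List.slice arr none (some (-1)))).foldl (fun st q =>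
          if p.2 + q.2 = n ∧ p.1 ≠ q.1 ∧ p.1 ∉ st.2 ∧ q.1 ∉ st.2 then
            (st.1 ++ [p.1, q.1], st.2 ++ [p.1, q.1])
          else st) st) (L, L)).1,
        (ps.foldl (fun (st : List Int × List Int) p =>
        (PySem.List.enumerate (PySem.List.slice arr none (some (-1)))).foldl (fun st q =>
          if p.2 + q.2 = n ∧ p.1 ≠ q.1 ∧ p.1 ∉ st.2 ∧ q.1 ∉ st.2 then
            (st.1 ++ [p.1, q.1], st.2 ++ [p.1, q.1])
          else st) st) (L, L)).1.sum) := by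
  induction ps with
  | nil => exact fun L => ⟨rfl, rfl⟩
  | cons p t ih =>
      intro L
      simp only [List.foldl_cons]
      by_cases hmem : p.1 ∈ L
      · rw [pv_enum_dropLast, if_pos hmem]
        have hA : ((PySem.List.pyRange 0 ((arr.length : Int) - 1) 1).map
            (fun j => (j, PySem.List.pyGetD arr j 0))).foldl (fun st q =>
            if p.2 + q.2 = n ∧ p.1 ≠ q.1 ∧ p.1 ∉ st.2 ∧ q.1 ∉ st.2 then
              (st.1 ++ [p.1, q.1], st.2 ++ [p.1, q.1])
            else st) ((L, L) : List Int × List Int) = (L, L) :=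
          pvA_inner_skip n p _ L L hmem
        rw [hA, ← pv_enum_dropLast]
        exact ih L
      · rw [pv_enum_dropLast, if_neg hmem]
        rw [pvA_inner_run n p _ L hmem, pv_partner arr n p.2 p.1 L]
        cases hr : ((PySem.List.pyRange 0 ((arr.length : Int) - 1) 1).map
            (fun j => (j, PySem.List.pyGetD arr j 0))).find?
            (fun q => decide (p.2 + q.2 = n ∧ p.1 ≠ q.1 ∧ q.1 ∉ L)) with
        | none =>
            simp only [Option.map_none]
            rw [← pv_enum_dropLast]
            exact ih L
        | some q =>
            have hq := List.find?_some hr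
            simp only [decide_eq_true_eq] at hq
            obtain ⟨hq1, hq2, hq3⟩ := hq
            simp only [Option.map_some]
            have hL' : PySem.Set.add (PySem.Set.add L p.1) q.1 = L ++ [p.1, q.1] := by
              rw [PySem.Set.add_of_not_mem hmem, PySem.Set.add_of_not_mem (by
                simp only [List.mem_append, List.mem_singleton]
                rintro (h | h)
                · exact hq3 h
                · exact hq2 h.symm)]
              simp
            have hsum : L.sum + p.1 + q.1 = (L ++ [p.1, q.1]).sum := by
              simp [List.sum_append]; ring
            rw [hL', hsum, ← pv_enum_dropLast]
            exact ih (L ++ [p.1, q.1])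

-- ===== VERDICT (by name: the statement is the Claim_ definition above) =====
theorem pairwise_spec : Claim_equal_pairwise := by
  intro arr n _
  unfold Spec_pairwise
  simp only [pairwise, pairwise_alt]
  have h := (pv_main arr n (PySem.List.enumerate arr) []).2
  simp only [List.sum_nil] at h
  have he : (PySem.Set.empty : PySem.Set Int) = ([] : List Int) := rfl
  rw [he, h]
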